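-- pv_equiv track=rewrite | github.com/gradgrind/WZS | program/timetable/tt_basic_data.py | simplify_room_lists
-- ===== SOURCE A (Python) =====
-- from typing import NamedTuple, Optional
--
-- def simplify_room_lists(roomlists: list[list[int]]
-- ) -> Optional[tuple[list[int], list[list[int]]]]:
--     """Simplify room lists, where possible, and check for room conflicts.
--
--     The basic room specifications for the individual "tlessons" are
--     processed into compulsory single rooms and further required rooms
--     which can be one of a number of choices.
--     This approach is in some respects not ideal, but given the
--     difficulties of specifying concisely the room requirements for
--     blocks containing multiple courses, it seemed a reasonable compromise.
--
--     <roomlists>: A list of lists. Each entry in the outer list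
--         corresponds to one required room. Such an entry is a list
--         containing the indexes of the permissible rooms.
--
--     Return:
--         List of required rooms (indexes) where there is no choice.
--         List of choice lists.
--
--     A <None> return value indicates invalid data.
--     """
--     ## Collect single room "choices" and remove redundant entries
--     srooms = set()      # (single) fixed room
--     rooms = []          # room choice list
--     for rchoice in roomlists:
--         if len(rchoice) == 1:
--             r = rchoice[0]
--             if r in srooms:
--                 return None     # Internal conflict!
--             srooms.add(r)
--         else:
--             rooms.append(rchoice)
--     # Filter already-claimed rooms from the choice lists, but retain
--     # ordering of choices
--     i = 0
--     while i < len(rooms):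
--         rl = rooms[i]
--         for r in srooms.intersection(rl):
--             rl.remove(r)
--         if rl:
--             if len(rl) == 1:
--                 # new single room
--                 srooms.add(rl[0])
--                 del rooms[i]
--                 i = 0
--             else:
--                 i += 1
--         else:
--             return None     # No rooms left, internal conflict!
--     # Sort according to list length
--     rooms.sort(key=len)
--     return (list(srooms), rooms)
-- ===== SOURCE B (Python) =====
-- def simplify_room_lists(roomlists):
--     # Pure fixpoint formulation: collect the forced single rooms, then repeatedly
--     # refilter all remaining choice lists against the claimed set and settle the
--     # first list that is down to at most one option.  (Does not mutate its input.)
--     srooms = set()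
--     for rc in roomlists:
--         if len(rc) == 1:
--             if rc[0] in srooms:
--                 return None
--             srooms.add(rc[0])
--     choices = [rc for rc in roomlists if len(rc) != 1]
--     while True:
--         remaining = [[r for r in rc if r not in srooms] for rc in choices]
--         j = next((k for k, rl in enumerate(remaining) if len(rl) <= 1), None)
--         if j is None:
--             return (list(srooms), sorted(remaining, key=len))
--         if not remaining[j]:
--             return None
--         srooms.add(remaining[j][0])
--         choices = remaining[:j] + remaining[j + 1:]
-- ===== Notes on version B (the rewrite author's own statement) =====
-- stated objective: simpler
-- what changed: Replaces A's in-place index-juggling while loop (mutate each list, delete entries, restart at i=0) by a pure round-based fixpoint that refilters all choice lists against the claimed set and settles the first forced list; Pre_ excludes roomlists in which one choice list names the same room twice, where A's remove-one-occurrence-per-pass mutation makes the result an accident of how often the passes revisit the list.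
-- outside the precondition, e.g. on simplify_room_lists([[1], [1, 1, 2]]): A returns ([1], [[1, 2]]), B returns ([1, 2], [])
import Mathlib
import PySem

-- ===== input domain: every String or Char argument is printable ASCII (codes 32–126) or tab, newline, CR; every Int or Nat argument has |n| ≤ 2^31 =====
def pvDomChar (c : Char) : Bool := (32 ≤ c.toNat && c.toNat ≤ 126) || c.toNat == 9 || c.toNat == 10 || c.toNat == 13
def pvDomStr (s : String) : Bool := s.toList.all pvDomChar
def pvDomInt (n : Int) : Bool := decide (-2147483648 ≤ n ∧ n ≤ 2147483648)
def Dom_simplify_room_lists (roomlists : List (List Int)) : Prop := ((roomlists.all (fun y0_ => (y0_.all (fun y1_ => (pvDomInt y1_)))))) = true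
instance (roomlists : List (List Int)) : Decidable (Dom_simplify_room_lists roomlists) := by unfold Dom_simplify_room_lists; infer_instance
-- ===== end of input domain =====

-- B replaces A's in-place, index-restarting scan loop by a pure round-based
-- fixpoint (refilter everything, settle the first forced list); objective: simpler.
-- Python A mutates its argument's inner lists in place; the equivalence proved
-- here is about the RETURN value only (B does not mutate).


-- ===== PORT A =====
-- Both Pythons keep the claimed rooms in a CPython `set` of ints and return
-- `list(srooms)`; that iteration order is deterministic for ints, and is modelled
-- exactly (CPython setobject.c: PySet_MINSIZE 8, LINEAR_PROBES 9, PERTURB_SHIFT 5,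
-- growth when fill*5 >= mask*3; int hash = the value itself for |n| ≤ 2^31,
-- except hash(-1) = -2).  Shared by both ports because both Pythons use `set`.

def pyIntHashU (r : Int) : UInt64 :=
  UInt64.ofNat ((if r = -1 then (-2 : Int) else r).emod (2 ^ 64)).toNat

-- first free slot among the probe window t[j], t[j+1], …, t[j+k] (all in range)
def cpyScanFree (t : List (Option Int)) : Nat → Nat → Option Nat
  | j, k =>
    match t.getD j none, k with
    | none, _ => some j
    | some _, 0 => none
    | some _, k + 1 => cpyScanFree t (j + 1) k

-- the probe sequence of set_add_entry/set_insert_clean on an ABSENT key: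
-- the slot where CPython puts it (fuel covers the sequence; a real table has a hole)
def cpyProbe (t : List (Option Int)) : UInt64 → UInt64 → Nat → Nat
  | _, _, 0 => 0
  | i, perturb, fuel + 1 =>
    let mask := t.length - 1
    let probes : Nat := if i.toNat + 9 ≤ mask then 9 else 0
    match cpyScanFree t i.toNat probes with
    | some j => j
    | none =>
      let perturb' := perturb >>> 5
      cpyProbe t ((i * 5 + 1 + perturb') &&& UInt64.ofNat mask) perturb' fuel

def cpyInsert (t : List (Option Int)) (r : Int) : List (Option Int) :=
  let h := pyIntHashU r
  t.set (cpyProbe t (h &&& UInt64.ofNat (t.length - 1)) h (t.length + 64)) (some r)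

structure CPySet where
  table : List (Option Int)   -- the slots, in index order (= iteration order)
  fill : Nat
  used : Nat
  elems : List Int            -- the members (membership queries; no order used)
deriving Repr, DecidableEq

def CPySet.empty : CPySet := ⟨List.replicate 8 none, 0, 0, []⟩

def CPySet.mem (s : CPySet) (r : Int) : Bool := s.elems.contains r

def cpyGrowSize (minused : Nat) : Nat → Nat → Nat
  | ns, 0 => ns
  | ns, fuel + 1 => if ns ≤ minused then cpyGrowSize minused (ns * 2) fuel else ns

def CPySet.resize (s : CPySet) (minused : Nat) : CPySet :=
  ⟨s.table.foldl (fun acc e => match e with | some x => cpyInsert acc x | none => acc)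
      (List.replicate (cpyGrowSize minused 8 64) none), s.used, s.used, s.elems⟩

def CPySet.add (s : CPySet) (r : Int) : CPySet :=
  if s.elems.contains r then s
  else
    let t := cpyInsert s.table r
    let s' : CPySet := ⟨t, s.fill + 1, s.used + 1, s.elems ++ [r]⟩
    if (s.fill + 1) * 5 ≥ (t.length - 1) * 3 then
      s'.resize (if s.used + 1 > 50000 then (s.used + 1) * 2 else (s.used + 1) * 4)
    else s'

def CPySet.toList (s : CPySet) : List Int := s.table.filterMap id

-- A's first `for rchoice in roomlists` loop: collect singleton choices into the
-- set (None on a duplicate single), queue the non-singletons in `rooms` in order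
def initSingles (S : CPySet) (rooms : List (List Int)) :
    List (List Int) → Option (CPySet × List (List Int))
  | [] => some (S, rooms)
  | rchoice :: rest =>
    match rchoice with
    | [r] => if S.mem r then none else initSingles (S.add r) rooms rest
    | _ => initSingles S (rooms ++ [rchoice]) rest

-- A's `while i < len(rooms)` loop. `for r in srooms.intersection(rl): rl.remove(r)`:
-- the intersection set is iterated in CPython's set order, but removing the FIRST
-- occurrence of each DISTINCT claimed room commutes, so the mutated rl does not
-- depend on that order; it is ported exactly as one `erase` per distinct claimed
-- room of rl, taken in rl's order (PySem.List.dedup = first occurrences in order).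
def aWhile (S : CPySet) (rooms : List (List Int)) (i : Nat) :
    Option (CPySet × List (List Int)) :=
  if h : i < rooms.length then
    match (PySem.List.dedup (rooms[i].filter (fun r => S.mem r))).foldl
        (fun rl r => rl.erase r) rooms[i] with
    | [] => none
    | [r] => aWhile (S.add r) ((rooms.set i [r]).eraseIdx i) 0
    | r1 :: r2 :: rs => aWhile S (rooms.set i (r1 :: r2 :: rs)) (i + 1)
  else some (S, rooms)
termination_by (rooms.length, rooms.length - i)
decreasing_by
  · apply Prod.Lex.left
    simp only [List.length_eraseIdx, List.length_set]
    rw [if_pos h]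
    omega
  · simp only [List.length_set]
    apply Prod.Lex.right
    omega

def simplify_room_lists (roomlists : List (List Int)) : Option (List Int × List (List Int)) :=
  match initSingles CPySet.empty [] roomlists with
  | none => none
  | some (srooms, rooms) =>
    match aWhile srooms rooms 0 with
    | none => none
    | some (srooms2, rooms2) =>
      some (srooms2.toList, PySem.List.sorted rooms2 (fun l => l.length) false)

-- ===== PORT B =====
-- Source B's first loop: only the singleton entries touch the set
def bSingles (S : CPySet) : List (List Int) → Option CPySet
  | [] => some S
  | rc :: rest =>
    match rc with
    | [r] => if S.mem r then none else bSingles (S.add r) rest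
    | _ => bSingles S rest

-- Source B's `while True` fixpoint: refilter every choice list, settle the first
-- forced one (next(... enumerate ...) = findIdx?), drop it, repeat
def bLoop (S : CPySet) (choices : List (List Int)) : Option (List Int × List (List Int)) :=
  let remaining := choices.map (fun rc => rc.filter (fun r => !S.mem r))
  match hj : remaining.findIdx? (fun rl => rl.length ≤ 1) with
  | none => some (S.toList, PySem.List.sorted remaining (fun l => l.length) false)
  | some j =>
    match remaining.getD j [] with     -- remaining[j]: j is in range (findIdx?)
    | [] => none
    | r :: _ => bLoop (S.add r) (remaining.take j ++ remaining.drop (j + 1))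
termination_by choices.length
decreasing_by
  have hjlt : j < remaining.length := (List.findIdx?_eq_some_iff_findIdx_eq.mp hj).1
  simp only [remaining, List.length_map, List.length_attach] at hjlt
  simp only [List.length_append, List.length_take, List.length_drop, List.length_map,
    List.length_attach]
  omega

def simplify_room_lists_alt (roomlists : List (List Int)) : Option (List Int × List (List Int)) :=
  match bSingles CPySet.empty roomlists with
  | none => none
  | some srooms => bLoop srooms (roomlists.filter (fun rc => !(rc.length == 1)))

-- ===== PRECONDITION & SPEC =====
-- Pre_ excludes roomlists in which one choice list names the same room twice: A
-- removes only ONE duplicate occurrence of a claimed room per scan pass there (it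
-- can even return a list still containing a claimed room), an accident of its
-- in-place mutation scheme, while B filters out every occurrence.
def Pre_simplify_room_lists (roomlists : List (List Int)) : Prop :=
  ∀ l ∈ roomlists, l.Nodup
instance (roomlists : List (List Int)) : Decidable (Pre_simplify_room_lists roomlists) := by
  unfold Pre_simplify_room_lists; infer_instance

def pvWitness_simplify_room_lists : List (List Int) := [[7], [3, 4], [4, 7, 9]]

def Spec_simplify_room_lists (roomlists : List (List Int)) (out : Option (List Int × List (List Int))) : Prop := out = simplify_room_lists_alt roomlists
instance (roomlists : List (List Int)) (out : Option (List Int × List (List Int))) : Decidable (Spec_simplify_room_lists roomlists out) := by unfold Spec_simplify_room_lists; infer_instance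

-- ===== CLAIM (what is proved, stated in full; the proofs are below) =====
def Claim_equal_simplify_room_lists : Prop := ∀ (roomlists : List (List Int)), Dom_simplify_room_lists roomlists → Pre_simplify_room_lists roomlists → Spec_simplify_room_lists roomlists (simplify_room_lists roomlists)

-- ===== LEMMAS AND PROOFS =====

-- membership in the claimed set only grows
theorem CPySet.mem_add_of_mem (s : CPySet) (r x : Int) (h : s.mem x = true) :
    (s.add r).mem x = true := by
  unfold CPySet.mem CPySet.add CPySet.resize at *
  by_cases hc : r ∈ s.elems
  · simpa [hc] using h
  · simp only [List.contains_eq_mem, hc, decide_false, Bool.false_eq_true, if_false]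
    split <;> simp_all [List.contains_eq_mem, List.mem_append]

-- notation for "the not-yet-claimed rooms of l"
def filtS (S : CPySet) (l : List Int) : List Int := l.filter (fun r => !S.mem r)

theorem filtS_filtS (S : CPySet) (l : List Int) : filtS S (filtS S l) = filtS S l := by
  simp [filtS, List.filter_filter]

theorem filtS_add_filtS (S : CPySet) (r : Int) (l : List Int) :
    filtS (S.add r) (filtS S l) = filtS (S.add r) l := by
  unfold filtS
  rw [List.filter_filter]
  apply List.filter_congr
  intro x _
  by_cases hx : S.mem x = true
  · have := CPySet.mem_add_of_mem S r x hx
    simp [hx, this]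
  · simp [Bool.not_eq_true] at hx
    simp [hx]

-- the two first passes build the same set and the same queue of choice lists
theorem initSingles_eq_bSingles (rest : List (List Int)) (S : CPySet) (acc : List (List Int)) :
    initSingles S acc rest =
      (match bSingles S rest with
       | none => none
       | some S' => some (S', acc ++ rest.filter (fun rc => !(rc.length == 1)))) := by
  induction rest generalizing S acc with
  | nil => simp [initSingles, bSingles]
  | cons rc rest ih =>
    cases rc with
    | nil =>
      simp only [initSingles, bSingles, ih, List.filter_cons]
      simp
    | cons a tl =>
      cases tl with
      | nil =>
        simp only [initSingles, bSingles]
        by_cases hm : S.mem a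
        · simp [hm]
        · simp [hm, ih]
      | cons b tl2 =>
        simp only [initSingles, bSingles, ih, List.filter_cons]
        simp

-- bLoop only looks at the filtered image of its argument
theorem bLoop_congr (S : CPySet) (c c' : List (List Int))
    (h : c.map (filtS S) = c'.map (filtS S)) : bLoop S c = bLoop S c' := by
  have h' : c.map (fun rc => rc.filter (fun r => !S.mem r))
      = c'.map (fun rc => rc.filter (fun r => !S.mem r)) := h
  rw [bLoop, bLoop, h']

-- removing one occurrence of each x ∈ xs from a duplicate-free list is a filter
theorem foldl_erase_eq_filter (xs : List Int) : ∀ (l : List Int), l.Nodup →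
    xs.foldl (fun rl r => rl.erase r) l = l.filter (fun x => !xs.contains x) := by
  induction xs with
  | nil => intro l _; simp
  | cons a xs ih =>
    intro l h
    simp only [List.foldl_cons]
    rw [ih (l.erase a) (h.erase a), List.Nodup.erase_eq_filter h a, List.filter_filter]
    apply List.filter_congr
    intro x _
    by_cases hxa : x = a <;> simp [hxa]

-- A's removal step, on a duplicate-free list, is exactly B's filter
theorem eraseStep_eq_filtS (S : CPySet) (l : List Int) (h : l.Nodup) :
    (PySem.List.dedup (l.filter (fun r => S.mem r))).foldl
      (fun rl r => rl.erase r) l = filtS S l := by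
  rw [foldl_erase_eq_filter _ l h]
  apply List.filter_congr
  intro x hx
  by_cases hm : S.mem x = true
  · simp [List.contains_eq_mem, hm, hx]
  · have hms : S.mem x = false := by simpa using hm
    simp [List.contains_eq_mem, hms, hx]

-- on A's scan frontier the first choice list with ≤ 1 free rooms is the one at i
theorem findIdx_helper (S : CPySet) (cur : List (List Int)) (i : Nat) (hi : i < cur.length)
    (hpre : ∀ k, k < i → filtS S (cur.getD k []) = cur.getD k [] ∧
      2 ≤ (cur.getD k []).length)
    (hlen : (filtS S cur[i]).length ≤ 1) :
    (cur.map (fun rc => rc.filter (fun r => !S.mem r))).findIdx?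
      (fun rl => rl.length ≤ 1) = some i := by
  rw [List.findIdx?_eq_some_iff_findIdx_eq]
  refine ⟨by simpa using hi, ?_⟩
  rw [List.findIdx_eq (by simpa using hi)]
  constructor
  · simpa [filtS] using hlen
  · intro j hj
    have hjl : j < cur.length := lt_trans hj hi
    have h1 := hpre j hj
    rw [List.getD_eq_getElem _ _ hjl] at h1
    simp only [filtS] at h1
    simp only [List.getElem_map, h1.1]
    have := h1.2
    simp only [decide_eq_false_iff_not]
    omega

-- the bridge: A's restart-scan loop, post-processed like A's main body, is bLoop
theorem aWhile_eq_bLoop : ∀ (S : CPySet) (cur : List (List Int)) (i : Nat),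
    i ≤ cur.length →
    (∀ k, k < i → filtS S (cur.getD k []) = cur.getD k [] ∧
      2 ≤ (cur.getD k []).length) →
    (∀ l ∈ cur, l.Nodup) →
    (match aWhile S cur i with
     | none => none
     | some p => some (p.1.toList, PySem.List.sorted p.2 (fun l => l.length) false))
    = bLoop S cur := by
  intro S cur i
  induction S, cur, i using aWhile.induct with
  | case1 S cur i h hf =>
    intro hi hpre hnd
    have hfe : filtS S cur[i] = [] := by
      rw [← eraseStep_eq_filtS S cur[i] (hnd _ (List.getElem_mem h))]
      exact hf
    rw [aWhile, bLoop]
    simp only [dif_pos h, hf]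
    have hfind := findIdx_helper S cur i h hpre (by rw [hfe]; simp)
    split
    · next hnone => exact absurd hnone (by simp [hfind])
    · next j hj =>
      rw [hfind] at hj
      injection hj with hj
      subst hj
      have hgd : (cur.map (fun rc => rc.filter (fun r => !S.mem r))).getD i [] = [] := by
        rw [List.getD_eq_getElem _ _ (by simpa using h), List.getElem_map]
        exact hfe
      rw [hgd]
  | case2 S cur i h r hf ih =>
    intro hi hpre hnd
    have hfe : filtS S cur[i] = [r] := by
      rw [← eraseStep_eq_filtS S cur[i] (hnd _ (List.getElem_mem h))]
      exact hf
    rw [aWhile, bLoop]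
    simp only [dif_pos h, hf]
    have hfind := findIdx_helper S cur i h hpre (by rw [hfe]; simp)
    rw [ih (by omega) (by intro k hk; omega) (by
      intro l hl
      rcases List.mem_or_eq_of_mem_set (List.mem_of_mem_eraseIdx hl) with h' | h'
      · exact hnd _ h'
      · subst h'; simp)]
    split
    · next hnone => exact absurd hnone (by simp [hfind])
    · next j hj =>
      rw [hfind] at hj
      injection hj with hj
      subst hj
      have hgd : (cur.map (fun rc => rc.filter (fun r => !S.mem r))).getD i [] = [r] := by
        rw [List.getD_eq_getElem _ _ (by simpa using h), List.getElem_map]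
        exact hfe
      rw [hgd]
      apply bLoop_congr
      rw [List.eraseIdx_set_eq]
      have e1 : (cur.map (fun rc => rc.filter (fun r => !S.mem r))).take i ++
        (cur.map (fun rc => rc.filter (fun r => !S.mem r))).drop (i + 1)
          = (cur.map (fun rc => rc.filter (fun r => !S.mem r))).eraseIdx i :=
        Eq.symm (List.eraseIdx_eq_take_drop_succ _ i)
      rw [e1, ← List.eraseIdx_map, ← List.eraseIdx_map]
      congr 1
      rw [List.map_map]
      apply List.map_congr_left
      intro x _
      exact (filtS_add_filtS S r x).symm
  | case3 S cur i h r1 r2 rs hf ih =>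
    intro hi hpre hnd
    have hfe : filtS S cur[i] = r1 :: r2 :: rs := by
      rw [← eraseStep_eq_filtS S cur[i] (hnd _ (List.getElem_mem h))]
      exact hf
    rw [aWhile]
    simp only [dif_pos h, hf]
    rw [ih (by simp; omega) ?_ ?_]
    · apply bLoop_congr
      show (cur.set i (r1 :: r2 :: rs)).map (filtS S) = cur.map (filtS S)
      rw [List.map_set]
      have : filtS S (r1 :: r2 :: rs) = r1 :: r2 :: rs := by
        rw [← hfe]; exact filtS_filtS S cur[i]
      rw [this, ← hfe]
      show (cur.map (filtS S)).set i (filtS S cur[i]) = cur.map (filtS S)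
      have : filtS S cur[i] = (cur.map (filtS S))[i]'(by simpa using h) := by
        simp [filtS]
      rw [this, List.set_getElem_self]
    · intro k hk
      by_cases hki : k < i
      · have h1 := hpre k hki
        have hkl : k < cur.length := lt_trans hki h
        rw [List.getD_eq_getElem _ _ hkl] at h1
        rw [List.getD_eq_getElem _ _ (by simpa using hkl), List.getElem_set]
        simp only [if_neg (by omega : ¬ i = k)]
        exact h1
      · have hki' : k = i := by omega
        subst hki'
        rw [List.getD_eq_getElem _ _ (by simpa using h), List.getElem_set]
        rw [if_pos rfl]
        constructor
        · rw [← hfe]; exact filtS_filtS S cur[k]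
        · simp
    · intro l hl
      rcases List.mem_or_eq_of_mem_set hl with h' | h'
      · exact hnd _ h'
      · rw [h', ← hfe]
        exact List.Nodup.filter _ (hnd _ (List.getElem_mem h))
  | case4 S cur i h =>
    intro hi hpre hnd
    rw [aWhile, bLoop]
    simp only [dif_neg h]
    have hlen : i = cur.length := by omega
    subst hlen
    have hmap : cur.map (fun rc => rc.filter (fun r => !S.mem r)) = cur := by
      apply List.ext_getElem (by simp)
      intro k hk hk'
      have h1 := hpre k (by simpa using hk')
      rw [List.getD_eq_getElem _ _ (by simpa using hk')] at h1
      simp only [List.getElem_map]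
      exact h1.1
    have hfind : (cur.map (fun rc => rc.filter (fun r => !S.mem r))).findIdx?
        (fun rl => rl.length ≤ 1) = none := by
      rw [List.findIdx?_eq_none_iff]
      intro x hx
      rw [hmap] at hx
      obtain ⟨k, hk, rfl⟩ := List.mem_iff_getElem.mp hx
      have h1 := hpre k hk
      rw [List.getD_eq_getElem _ _ hk] at h1
      simp only [decide_eq_false_iff_not]
      omega
    split
    · next => rw [hmap]
    · next j hj => exact absurd hj (by simp [hfind])

-- ===== VERDICT (by name: the statement is the Claim_ definition above) =====
theorem simplify_room_lists_spec : Claim_equal_simplify_room_lists := by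
  intro roomlists _ hpre
  unfold Spec_simplify_room_lists simplify_room_lists simplify_room_lists_alt
  rw [initSingles_eq_bSingles]
  cases h : bSingles CPySet.empty roomlists with
  | none => rfl
  | some S =>
    simp only [List.nil_append]
    rw [← aWhile_eq_bLoop S _ 0 (by omega) (by intro k hk; omega)
      (by intro l hl; exact ‹Pre_simplify_room_lists roomlists› l (List.mem_of_mem_filter hl))]
    cases aWhile S (roomlists.filter (fun rc => !(rc.length == 1))) 0 with
    | none => rfl
    | some p => rfl
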